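-- pv_equiv track=rewrite | github.com/barmaleii77-hub/pneumo2 | pneumo2_R31CN_HF8_repo_root/pneumo_solver_ui/optimization_stage_policy_audit.py | _top_reason
-- ===== SOURCE A (Python) =====
-- from typing import Any, Dict, Mapping, Sequence
--
-- def _safe_int(value: Any, default: int = 0) -> int:
--     try:
--         return int(value)
--     except Exception:
--         try:
--             return int(float(value))
--         except Exception:
--             return int(default)
--
-- def _top_reason(counts: Mapping[str, Any] | None) -> str:
--     if not isinstance(counts, Mapping):
--         return ""
--     best_key = ""
--     best_val = -1
--     for key, value in counts.items():
--         sval = str(key or "").strip()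
--         ival = _safe_int(value, 0)
--         if not sval or ival <= 0:
--             continue
--         if ival > best_val or (ival == best_val and sval < best_key):
--             best_key = sval
--             best_val = ival
--     return best_key
-- ===== SOURCE B (Python) =====
-- from typing import Any, Mapping
--
-- def _safe_int(value: Any, default: int = 0) -> int:
--     try:
--         return int(value)
--     except Exception:
--         try:
--             return int(float(value))
--         except Exception:
--             return int(default)
--
-- def _top_reason(counts: "Mapping[str, Any] | None") -> str:
--     if not isinstance(counts, Mapping):
--         return ""
--     candidates = [
--         (ival, sval)
--         for key, value in counts.items()
--         for sval in (str(key or "").strip(),)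
--         for ival in (_safe_int(value, 0),)
--         if sval and ival > 0
--     ]
--     if not candidates:
--         return ""
--     return sorted(candidates, key=lambda c: (-c[0], c[1]))[0][1]
-- ===== Notes on version B (the rewrite author's own statement) =====
-- stated objective: alternative
-- what changed: A tracks the best (key, value) in a single pass with an explicit best-so-far comparison; B builds the filtered candidate list and sorts it by the tuple key (-count, key), returning the head's key.
import Mathlib
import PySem

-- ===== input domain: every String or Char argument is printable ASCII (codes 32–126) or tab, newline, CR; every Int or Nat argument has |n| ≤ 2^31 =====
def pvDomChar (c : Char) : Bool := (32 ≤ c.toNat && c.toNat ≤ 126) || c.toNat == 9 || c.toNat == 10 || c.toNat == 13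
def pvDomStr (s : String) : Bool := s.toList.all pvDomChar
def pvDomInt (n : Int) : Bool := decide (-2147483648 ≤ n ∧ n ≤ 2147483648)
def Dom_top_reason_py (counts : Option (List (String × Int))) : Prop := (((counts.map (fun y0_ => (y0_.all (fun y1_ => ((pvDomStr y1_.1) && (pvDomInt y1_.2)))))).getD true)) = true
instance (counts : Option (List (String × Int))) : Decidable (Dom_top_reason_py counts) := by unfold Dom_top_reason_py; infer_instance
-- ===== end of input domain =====

-- B replaces A's single-pass best-so-far tracking by building the filtered candidate list
-- and sorting it by the tuple key (-count, key) (objective: alternative decomposition; not faster).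
-- A mutates nothing; equivalence is about the return value.

-- ===== PORT A =====
-- one loop carrying (best_key, best_val); `str(key or "").strip()` is the if-then-else + strip;
-- `_safe_int(value, 0)` on an int argument is `int(value) = value` (exact for Int inputs)
def top_reason_py (counts : Option (List (String × Int))) : String :=
  match counts with
  | none => ""
  | some xs =>
    let r := xs.foldl (fun b kv =>
      let sval := PySem.Str.strip (if kv.1 = "" then "" else kv.1)
      let ival := kv.2
      if sval = "" ∨ ival ≤ 0 then b
      else if ival > b.2 ∨ (ival = b.2 ∧ sval < b.1) then (sval, ival) else b)
      ("", -1)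
    r.1

-- ===== PORT B =====
-- candidate list via filterMap (the comprehension), then sorted by the Python tuple key
-- (-c[0], c[1]) — the lexicographic order on Int ×ₗ String — and the head's string is returned
def top_reason_py_alt (counts : Option (List (String × Int))) : String :=
  match counts with
  | none => ""
  | some xs =>
    let candidates := xs.filterMap (fun kv =>
      let sval := PySem.Str.strip (if kv.1 = "" then "" else kv.1)
      let ival := kv.2
      if sval ≠ "" ∧ 0 < ival then some (ival, sval) else none)
    if candidates.isEmpty then ""
    else
      match PySem.List.sorted candidates (fun c => toLex (-c.1, c.2)) false with
      | [] => ""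
      | m :: _ => m.2

-- ===== PRECONDITION & SPEC =====
def Spec_top_reason_py (counts : Option (List (String × Int))) (out : String) : Prop := out = top_reason_py_alt counts
instance (counts : Option (List (String × Int))) (out : String) : Decidable (Spec_top_reason_py counts out) := by unfold Spec_top_reason_py; infer_instance

-- ===== CLAIM (what is proved, stated in full; the proofs are below) =====
def Claim_equal_top_reason_py : Prop := ∀ (counts : Option (List (String × Int))), Dom_top_reason_py counts → Spec_top_reason_py counts (top_reason_py counts)

-- ===== LEMMAS AND PROOFS =====

-- the filter of B's comprehension
def pvFilt (kv : String × Int) : Option (Int × String) :=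
  let sval := PySem.Str.strip (if kv.1 = "" then "" else kv.1)
  let ival := kv.2
  if sval ≠ "" ∧ 0 < ival then some (ival, sval) else none

-- A's update step on an already-filtered candidate
def pvStep (b : String × Int) (c : Int × String) : String × Int :=
  if c.1 > b.2 ∨ (c.1 = b.2 ∧ c.2 < b.1) then (c.2, c.1) else b

-- Python's sort key for a candidate / for A's accumulator
def pvK (c : Int × String) : Lex (Int × String) := toLex (-c.1, c.2)
def pvKB (b : String × Int) : Lex (Int × String) := toLex (-b.2, b.1)

lemma pvStep_iff (b : String × Int) (c : Int × String) :
    (c.1 > b.2 ∨ (c.1 = b.2 ∧ c.2 < b.1)) ↔ pvK c < pvKB b := by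
  simp only [pvK, pvKB, Prod.Lex.toLex_lt_toLex]
  constructor
  · rintro (h | ⟨h1, h2⟩)
    · exact Or.inl (by omega)
    · exact Or.inr ⟨by omega, h2⟩
  · rintro (h | ⟨h1, h2⟩)
    · exact Or.inl (by omega)
    · exact Or.inr ⟨by omega, h2⟩

-- A's loop over the raw pairs is pvStep folded over the filtered candidates
lemma pvFold_filter (xs : List (String × Int)) (b : String × Int) :
    xs.foldl (fun b kv =>
      let sval := PySem.Str.strip (if kv.1 = "" then "" else kv.1)
      let ival := kv.2
      if sval = "" ∨ ival ≤ 0 then b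
      else if ival > b.2 ∨ (ival = b.2 ∧ sval < b.1) then (sval, ival) else b) b
    = (xs.filterMap pvFilt).foldl pvStep b := by
  induction xs generalizing b with
  | nil => rfl
  | cons kv t ih =>
    simp only [List.foldl_cons, List.filterMap_cons]
    by_cases h : PySem.Str.strip (if kv.1 = "" then "" else kv.1) ≠ "" ∧ 0 < kv.2
    · rw [show pvFilt kv = some (kv.2, PySem.Str.strip (if kv.1 = "" then "" else kv.1)) from by
        unfold pvFilt; rw [if_pos h]]
      simp only [List.foldl_cons]
      rw [if_neg (fun hcon => hcon.elim h.1 (fun hv => absurd h.2 (not_lt.mpr hv))), ih]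
      rfl
    · rw [show pvFilt kv = none from by unfold pvFilt; rw [if_neg h],
        if_pos (by
          by_cases hs : PySem.Str.strip (if kv.1 = "" then "" else kv.1) = ""
          · exact Or.inl hs
          · exact Or.inr (le_of_not_gt (fun hv => h ⟨hs, hv⟩))), ih]

-- the fold computes a key-minimal element: its key is ≤ every candidate key and ≤ the start key,
-- and the result is the start or (reversed) one of the candidates
lemma pvFold_min (cs : List (Int × String)) (b : String × Int) :
    (∀ c ∈ cs, pvKB (cs.foldl pvStep b) ≤ pvK c) ∧
    pvKB (cs.foldl pvStep b) ≤ pvKB b ∧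
    (cs.foldl pvStep b = b ∨ ∃ c ∈ cs, cs.foldl pvStep b = (c.2, c.1)) := by
  induction cs generalizing b with
  | nil => simp
  | cons c t ih =>
    simp only [List.foldl_cons]
    have hkey : pvKB (pvStep b c) ≤ pvKB b ∧ pvKB (pvStep b c) ≤ pvK c := by
      unfold pvStep
      by_cases h : c.1 > b.2 ∨ (c.1 = b.2 ∧ c.2 < b.1)
      · rw [if_pos h]
        have := (pvStep_iff b c).mp h
        exact ⟨le_of_lt (by simpa [pvKB, pvK] using this), le_refl _⟩
      · rw [if_neg h]
        have := (pvStep_iff b c).not.mp h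
        exact ⟨le_refl _, le_of_not_gt (by simpa [pvKB, pvK] using this)⟩
    obtain ⟨ih1, ih2, ih3⟩ := ih (pvStep b c)
    refine ⟨?_, le_trans ih2 hkey.1, ?_⟩
    · intro d hd
      rcases List.mem_cons.mp hd with hd | hd
      · exact le_trans ih2 (hd ▸ hkey.2)
      · exact ih1 d hd
    · rcases ih3 with h | ⟨d, hd, h⟩
      · rw [h]; unfold pvStep
        by_cases hc : c.1 > b.2 ∨ (c.1 = b.2 ∧ c.2 < b.1)
        · exact Or.inr ⟨c, List.mem_cons_self .., by rw [if_pos hc]⟩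
        · exact Or.inl (by rw [if_neg hc])
      · exact Or.inr ⟨d, List.mem_cons_of_mem _ hd, h⟩

lemma pvFilt_pos (xs : List (String × Int)) : ∀ c ∈ xs.filterMap pvFilt, 0 < c.1 := by
  intro c hc
  obtain ⟨kv, _, hf⟩ := List.mem_filterMap.mp hc
  simp only [pvFilt] at hf
  by_cases h : PySem.Str.strip (if kv.1 = "" then "" else kv.1) ≠ "" ∧ 0 < kv.2
  · rw [if_pos h] at hf
    cases Option.some.inj hf
    exact h.2
  · rw [if_neg h] at hf
    cases hf

-- ===== VERDICT (by name: the statement is the Claim_ definition above) =====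
theorem top_reason_py_spec : Claim_equal_top_reason_py := by
  intro counts _
  show top_reason_py counts = top_reason_py_alt counts
  match counts with
  | none => rfl
  | some xs =>
    have hA : top_reason_py (some xs) = ((xs.filterMap pvFilt).foldl pvStep ("", -1)).1 := by
      simp only [top_reason_py]
      rw [pvFold_filter]
    have hB : top_reason_py_alt (some xs) =
        (if (xs.filterMap pvFilt).isEmpty then ""
         else match PySem.List.sorted (xs.filterMap pvFilt) (fun c => toLex (-c.1, c.2)) false with
           | [] => "" | m :: _ => m.2) := rfl
    rw [hA, hB]
    set cs := xs.filterMap pvFilt with hcs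
    by_cases hnil : cs = []
    · rw [hnil]; rfl
    · rw [if_neg (by simpa [List.isEmpty_iff] using hnil)]
      obtain ⟨m, t, hm⟩ : ∃ m t, PySem.List.sorted cs (fun c => toLex (-c.1, c.2)) false = m :: t := by
        rcases h : PySem.List.sorted cs (fun c => toLex (-c.1, c.2)) false with _ | ⟨m, t⟩
        · exact absurd ((PySem.List.sorted_eq_nil_iff cs _ false).mp h) hnil
        · exact ⟨m, t, rfl⟩
      rw [hm]
      have hmem : m ∈ cs := by
        have : m ∈ PySem.List.sorted cs (fun c => toLex (-c.1, c.2)) false := by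
          rw [hm]; exact List.mem_cons_self ..
        exact (PySem.List.mem_sorted cs _ false m).mp this
      have hmle : ∀ y ∈ cs, pvK m ≤ pvK y := by
        intro y hy; exact PySem.List.key_head_sorted_le cs _ hm y hy
      obtain ⟨h1, _, h3⟩ := pvFold_min cs ("", -1)
      rcases h3 with h | ⟨c, hc, h⟩
      · -- impossible: every candidate beats the sentinel ("", -1)
        exfalso
        have hb := h1 m hmem
        rw [h] at hb
        have hpos := pvFilt_pos xs m (hcs ▸ hmem)
        simp only [pvKB, pvK, Prod.Lex.toLex_le_toLex] at hb
        rcases hb with hb | ⟨hb, _⟩ <;> omega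
      · -- the fold returned candidate c; its sort key equals m's, so the strings agree
        rw [h]
        have hcm : pvK c = pvK m := by
          have hle : pvK c ≤ pvK m := by have := h1 m hmem; rwa [h] at this
          exact le_antisymm hle (hmle c hc)
        simp only [pvK] at hcm
        have hpair : (-c.1, c.2) = (-m.1, m.2) := toLex.injective hcm
        have h2 := congrArg Prod.snd hpair
        exact h2
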